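-- pv_equiv track=rewrite | github.com/picografix/pythonProjects | pairwiseRunningPartial.py | check
-- ===== SOURCE A (Python) =====
-- def check(li):
--     a = len(li)
--     ans=True
--     sum = 0
--     for i in range(a):
--         for j in range(i,a):
--             if i!=j and li[i]+li[j] !=sum:
--                 sum = li[i]+li[j]
--             elif i!=j and li[i]+li[j] ==sum:
--                 ans = False
--                 break
--     return ans
-- ===== SOURCE B (Python) =====
-- def check(li):
--     n = len(li)
--     sums = []
--     for i in range(n):
--         for j in range(i + 1, n):
--             sums.append(li[i] + li[j])
--     for k in range(len(sums) - 1):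
--         if sums[k] == sums[k + 1]:
--             return False
--     return True
-- ===== Notes on version B (the rewrite author's own statement) =====
-- stated objective: alternative
-- what changed: A's fused nested scan carrying a running previous-sum, an answer flag and a break is replaced by materializing the row-major list of pair-sums first and then scanning it once for two equal consecutive entries.
-- intended difference: On lists whose first pair-sum is zero while all other consecutive pair-sums in row-major order differ, A returns False because its running sum starts at a sentinel of zero and falsely counts the first pair-sum as a repeat, while B returns True, the intended answer since no pair-sum actually repeats. — e.g. on check([1, -1]): A returns false, B returns true
import Mathlib
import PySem

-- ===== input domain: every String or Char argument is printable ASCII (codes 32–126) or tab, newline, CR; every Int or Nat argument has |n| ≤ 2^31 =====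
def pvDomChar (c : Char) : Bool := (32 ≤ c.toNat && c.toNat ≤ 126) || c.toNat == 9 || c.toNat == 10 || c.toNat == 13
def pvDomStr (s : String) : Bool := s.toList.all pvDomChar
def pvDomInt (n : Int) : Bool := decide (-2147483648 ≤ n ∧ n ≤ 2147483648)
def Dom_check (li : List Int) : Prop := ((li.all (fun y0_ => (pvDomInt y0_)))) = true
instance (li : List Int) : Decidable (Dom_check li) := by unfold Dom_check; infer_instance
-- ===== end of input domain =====

-- B builds the row-major list of pair-sums and checks whether two consecutive entries are
-- ever equal (objective: idiomatic); it differs from A only on the D_check inputs stated below.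

-- ===== PORT A =====
-- li[idx] (indices produced by the loops are always in range)
def aGet (li : List Int) (idx : Int) : Int := PySem.List.pyGetD li idx 0

-- inner 'for j in range(i, a)' with its break; state = (ans, sum)
def checkInner (li : List Int) (i : Int) : List Int → Bool → Int → Bool × Int
  | [], ans, s => (ans, s)
  | j :: js, ans, s =>
    if i ≠ j ∧ aGet li i + aGet li j ≠ s then
      checkInner li i js ans (aGet li i + aGet li j)
    else if i ≠ j ∧ aGet li i + aGet li j = s then
      (false, s)
    else
      checkInner li i js ans s

-- outer 'for i in range(a)'
def checkOuter (li : List Int) : List Int → Bool → Int → Bool × Int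
  | [], ans, s => (ans, s)
  | i :: is', ans, s =>
    checkOuter li is'
      (checkInner li i (PySem.List.pyRange i (li.length : Int) 1) ans s).1
      (checkInner li i (PySem.List.pyRange i (li.length : Int) 1) ans s).2

def check (li : List Int) : Bool :=
  (checkOuter li (PySem.List.pyRange 0 (li.length : Int) 1) true 0).1

-- ===== PORT B =====
-- 'for j in range(i + 1, n): sums.append(li[i] + li[j])'
def bInner (li : List Int) (i : Int) : List Int → List Int → List Int
  | [], sums => sums
  | j :: js, sums =>
    bInner li i js (sums ++ [PySem.List.pyGetD li i 0 + PySem.List.pyGetD li j 0])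

-- 'for i in range(n): …'
def bOuter (li : List Int) : List Int → List Int → List Int
  | [], sums => sums
  | i :: is', sums =>
    bOuter li is' (bInner li i (PySem.List.pyRange (i + 1) (li.length : Int) 1) sums)

-- 'for k in range(len(sums) - 1): if sums[k] == sums[k + 1]: return False'
def bScan (sums : List Int) : List Int → Bool
  | [] => true
  | k :: ks =>
    if PySem.List.pyGetD sums k 0 = PySem.List.pyGetD sums (k + 1) 0 then false
    else bScan sums ks

def check_alt (li : List Int) : Bool :=
  let sums := bOuter li (PySem.List.pyRange 0 (li.length : Int) 1) []
  bScan sums (PySem.List.pyRange 0 ((sums.length : Int) - 1) 1)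

-- ===== PRECONDITION & SPEC =====
-- On lists whose first pair-sum is zero while all other consecutive pair-sums in row-major
-- order differ, A returns False — its running sum starts at a sentinel of zero, so it falsely
-- counts the first pair-sum as a repeat — while B returns True, the intended answer since no
-- pair-sum actually repeats.
def D_check (li : List Int) : Prop :=
  let n : Int := li.length
  let g : Int → Int := aGet li
  2 ≤ n ∧ g 0 + g 1 = 0 ∧ ∀ i ∈ PySem.List.pyRange 0 (n - 2) 1,
    g (i + 1) ≠ g (i + 2) ∧ g i + g (n - 1) ≠ g (i + 1) + g (i + 2)
instance (li : List Int) : Decidable (D_check li) := by unfold D_check; infer_instance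

def Spec_check (li : List Int) (out : Bool) : Prop := ¬ D_check li → out = check_alt li
instance (li : List Int) (out : Bool) : Decidable (Spec_check li out) := by unfold Spec_check; infer_instance

def pvDiffWitness_check : List Int := [1, -1]
def pvDiffWitnessOut_check : Bool × Bool := (false, true)

-- ===== CLAIM (what is proved, stated in full; the proofs are below) =====
def Claim_unchanged_check : Prop := ∀ (li : List Int), Dom_check li → Spec_check li (check li)
def Claim_changed_check : Prop := Dom_check (pvDiffWitness_check) ∧ D_check (pvDiffWitness_check) ∧ check (pvDiffWitness_check) = pvDiffWitnessOut_check.1 ∧ check_alt (pvDiffWitness_check) = pvDiffWitnessOut_check.2 ∧ pvDiffWitnessOut_check.1 ≠ pvDiffWitnessOut_check.2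
def Claim_exact_check : Prop := ∀ (li : List Int), Dom_check li → D_check li → check li ≠ check_alt li

-- ===== LEMMAS AND PROOFS =====

-- the pair-sum sequence of row i: li[i]+li[j] for j in i+1..n-1
def rowS (li : List Int) (i : Int) : List Int :=
  (PySem.List.pyRange (i + 1) (li.length : Int) 1).map (fun j => aGet li i + aGet li j)

def flatS (li : List Int) (is' : List Int) : List Int := is'.flatMap (rowS li)

-- generic: a chain over a cons-append splits at the last element of the first block
theorem chain_cons_append {α : Type} {R : α → α → Prop} (s : α) (l r : List α) :
    List.IsChain R (s :: (l ++ r)) ↔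
      List.IsChain R (s :: l) ∧ List.IsChain R ((s :: l).getLast (by simp) :: r) := by
  rw [show s :: (l ++ r) = (s :: l) ++ r from rfl, List.isChain_append,
    List.getLast?_eq_some_getLast (show (s :: l) ≠ [] from by simp)]
  simp only [Option.mem_def, Option.some.injEq]
  constructor
  · rintro ⟨h1, h2, h3⟩
    exact ⟨h1, List.isChain_cons.mpr ⟨fun y hy => h3 _ rfl y hy, h2⟩⟩
  · rintro ⟨h1, hc⟩
    obtain ⟨h2, h3⟩ := List.isChain_cons.mp hc
    exact ⟨h1, h3, fun x hx y hy => hx ▸ h2 y hy⟩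

theorem getLast_cons_append {α : Type} (s : α) (l r : List α) :
    (s :: (l ++ r)).getLast (by simp) =
      (((s :: l).getLast (by simp)) :: r).getLast (by simp) := by
  cases r with
  | nil => simp
  | cons x xs =>
    trans (x :: xs).getLast (by simp)
    · exact List.getLast_append_of_ne_nil (l := s :: l) (by simp) (by simp)
    · exact (List.getLast_cons (by simp)).symm

-- adjacency inside a range
theorem chain_range (S : Int → Int → Prop) (a b : Int) :
    List.IsChain S (PySem.List.pyRange a b 1) ↔
      ∀ j, a ≤ j → j + 1 ≤ b - 1 → S j (j + 1) := by
  have key : ∀ (m : Nat) (a : Int), (b - a).toNat = m →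
      (List.IsChain S (PySem.List.pyRange a b 1) ↔
        ∀ j, a ≤ j → j + 1 ≤ b - 1 → S j (j + 1)) := by
    intro m
    induction m with
    | zero =>
      intro a ha
      rw [PySem.List.pyRange_one_eq_nil (by omega)]
      simp only [List.IsChain.nil, true_iff]
      intro j h1 h2; omega
    | succ k ih =>
      intro a ha
      rw [PySem.List.pyRange_one_cons (by omega)]
      by_cases hb : a + 1 < b
      · rw [PySem.List.pyRange_one_cons (by omega), List.isChain_cons_cons,
          ← PySem.List.pyRange_one_cons (by omega), ih (a + 1) (by omega)]
        constructor
        · rintro ⟨h1, h2⟩ j hj1 hj2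
          rcases eq_or_lt_of_le hj1 with h | h
          · exact h ▸ h1
          · exact h2 j (by omega) hj2
        · intro h
          exact ⟨h a le_rfl (by omega), fun j hj1 hj2 => h j (by omega) hj2⟩
      · rw [PySem.List.pyRange_one_eq_nil (by omega)]
        simp only [List.isChain_singleton, true_iff]
        intro j h1 h2; omega
  exact key ((b - a).toNat) a rfl

theorem pyRange_getLast (a b : Int) (h : a < b) (hne : PySem.List.pyRange a b 1 ≠ []) :
    (PySem.List.pyRange a b 1).getLast hne = b - 1 := by
  have e : PySem.List.pyRange a b 1 = PySem.List.pyRange a (b - 1) 1 ++ [b - 1] := by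
    have := PySem.List.pyRange_one_succ_right (a := a) (b := b - 1) (by omega)
    rwa [sub_add_cancel] at this
  have h2 : (PySem.List.pyRange a b 1).getLast? = some (b - 1) := by
    rw [e]; exact List.getLast?_concat
  rw [List.getLast?_eq_some_getLast hne] at h2
  exact Option.some.inj h2

theorem rowS_ne_nil (li : List Int) (i : Int) (h : i + 1 < (li.length : Int)) :
    rowS li i ≠ [] := by
  unfold rowS
  rw [PySem.List.pyRange_one_cons (by omega)]
  simp

theorem rowS_head (li : List Int) (i : Int) (h : i + 1 < (li.length : Int)) :
    (rowS li i).head? = some (aGet li i + aGet li (i + 1)) := by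
  unfold rowS
  rw [PySem.List.pyRange_one_cons (by omega)]
  simp

theorem rowS_getLast (li : List Int) (i : Int) (h : i + 1 < (li.length : Int))
    (hne : rowS li i ≠ []) :
    (rowS li i).getLast hne = aGet li i + aGet li ((li.length : Int) - 1) := by
  have h2 : (rowS li i).getLast? = some (aGet li i + aGet li ((li.length : Int) - 1)) := by
    unfold rowS
    rw [List.getLast?_map,
      List.getLast?_eq_some_getLast (by rw [PySem.List.pyRange_one_cons (by omega)]; simp),
      pyRange_getLast _ _ (by omega)]
    rfl
  rw [List.getLast?_eq_some_getLast hne] at h2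
  exact Option.some.inj h2

-- ===== A-side: the nested loop computes the chain condition =====

theorem inner_false (li : List Int) (i : Int) :
    ∀ (js : List Int) (s : Int), (checkInner li i js false s).1 = false := by
  intro js
  induction js with
  | nil => intro s; rfl
  | cons j js ih =>
    intro s
    unfold checkInner
    split
    · exact ih _
    · split
      · rfl
      · exact ih _

theorem inner_skip (li : List Int) (i : Int) (js : List Int) (ans : Bool) (s : Int) :
    checkInner li i (i :: js) ans s = checkInner li i js ans s := by
  rw [checkInner]
  simp

theorem inner_ok (li : List Int) (i : Int) :
    ∀ (js : List Int) (s : Int), (∀ j ∈ js, j ≠ i) →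
      List.IsChain Ne (s :: js.map (fun j => aGet li i + aGet li j)) →
      checkInner li i js true s =
        (true, (s :: js.map (fun j => aGet li i + aGet li j)).getLast (by simp)) := by
  intro js
  induction js with
  | nil => intro s _ _; rfl
  | cons j js ih =>
    intro s hne hc
    have hji : j ≠ i := hne j (by simp)
    simp only [List.map_cons, List.isChain_cons_cons] at hc
    unfold checkInner
    rw [if_pos ⟨Ne.symm hji, Ne.symm hc.1⟩, ih _ (fun x hx => hne x (by simp [hx])) hc.2]
    exact congrArg (Prod.mk true) (List.getLast_cons (by simp)).symm

theorem inner_bad (li : List Int) (i : Int) :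
    ∀ (js : List Int) (ans : Bool) (s : Int), (∀ j ∈ js, j ≠ i) →
      ¬ List.IsChain Ne (s :: js.map (fun j => aGet li i + aGet li j)) →
      (checkInner li i js ans s).1 = false := by
  intro js
  induction js with
  | nil => intro ans s _ hc; exact absurd (by simp) hc
  | cons j js ih =>
    intro ans s hne hc
    have hji : j ≠ i := hne j (by simp)
    simp only [List.map_cons, List.isChain_cons_cons] at hc
    by_cases heq : aGet li i + aGet li j = s
    · unfold checkInner
      rw [if_neg (by simp [heq]), if_pos ⟨Ne.symm hji, heq⟩]
    · unfold checkInner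
      rw [if_pos ⟨Ne.symm hji, heq⟩]
      exact ih _ _ (fun x hx => hne x (by simp [hx]))
        (fun h => hc ⟨Ne.symm heq, h⟩)

theorem outer_false (li : List Int) :
    ∀ (is' : List Int) (s : Int), (checkOuter li is' false s).1 = false := by
  intro is'
  induction is' with
  | nil => intro s; rfl
  | cons i is' ih =>
    intro s
    unfold checkOuter
    rw [inner_false li i (PySem.List.pyRange i (li.length : Int) 1) s]
    exact ih _

theorem row_step (li : List Int) (i : Int) (_h0 : 0 ≤ i) (hn : i < (li.length : Int))
    (ans : Bool) (s : Int) :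
    checkInner li i (PySem.List.pyRange i (li.length : Int) 1) ans s =
      checkInner li i (PySem.List.pyRange (i + 1) (li.length : Int) 1) ans s := by
  rw [PySem.List.pyRange_one_cons hn, inner_skip]

theorem outer_ok (li : List Int) :
    ∀ (is' : List Int) (s : Int), (∀ i ∈ is', 0 ≤ i ∧ i < (li.length : Int)) →
      List.IsChain Ne (s :: flatS li is') →
      checkOuter li is' true s = (true, (s :: flatS li is').getLast (by simp)) := by
  intro is'
  induction is' with
  | nil => intro s _ _; rfl
  | cons i is' ih =>
    intro s hmem hc
    obtain ⟨h0, hn⟩ := hmem i (by simp)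
    have hflat : flatS li (i :: is') = rowS li i ++ flatS li is' := by simp [flatS]
    rw [hflat] at hc
    unfold checkOuter
    by_cases hlt : i + 1 < (li.length : Int)
    · rw [chain_cons_append] at hc
      have e1 : checkInner li i (PySem.List.pyRange i (li.length : Int) 1) true s =
          (true, (s :: rowS li i).getLast (by simp)) := by
        rw [row_step li i h0 hn]
        exact inner_ok li i _ s
          (fun j hj => by
            rw [PySem.List.mem_pyRange_one] at hj; omega)
          hc.1
      rw [e1]
      dsimp only
      rw [ih _ (fun x hx => hmem x (by simp [hx])) hc.2, hflat, getLast_cons_append]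
    · have hrow : rowS li i = [] := by
        unfold rowS
        rw [PySem.List.pyRange_one_eq_nil (by omega)]
        rfl
      rw [hrow] at hc
      simp only [List.nil_append] at hc
      have e1 : checkInner li i (PySem.List.pyRange i (li.length : Int) 1) true s =
          (true, s) := by
        rw [row_step li i h0 hn, PySem.List.pyRange_one_eq_nil (by omega)]
        rfl
      rw [e1]
      dsimp only
      rw [ih _ (fun x hx => hmem x (by simp [hx])) hc, hflat, hrow, List.nil_append]

theorem outer_bad (li : List Int) :
    ∀ (is' : List Int) (ans : Bool) (s : Int), (∀ i ∈ is', 0 ≤ i ∧ i < (li.length : Int)) →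
      ¬ List.IsChain Ne (s :: flatS li is') →
      (checkOuter li is' ans s).1 = false := by
  intro is'
  induction is' with
  | nil => intro ans s _ hc; exact absurd (by simp [flatS]) hc
  | cons i is' ih =>
    intro ans s hmem hc
    cases ans with
    | false => exact outer_false li _ _
    | true =>
      obtain ⟨h0, hn⟩ := hmem i (by simp)
      have hflat : flatS li (i :: is') = rowS li i ++ flatS li is' := by simp [flatS]
      rw [hflat] at hc
      unfold checkOuter
      by_cases hlt : i + 1 < (li.length : Int)
      · by_cases hrow : List.IsChain Ne (s :: rowS li i)
        · have hc2 : ¬ List.IsChain Ne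
              (((s :: rowS li i).getLast (by simp)) :: flatS li is') := by
            intro h; exact hc ((chain_cons_append s _ _).2 ⟨hrow, h⟩)
          have e1 : checkInner li i (PySem.List.pyRange i (li.length : Int) 1) true s =
              (true, (s :: rowS li i).getLast (by simp)) := by
            rw [row_step li i h0 hn]
            exact inner_ok li i _ s
              (fun j hj => by rw [PySem.List.mem_pyRange_one] at hj; omega) hrow
          rw [e1]
          dsimp only
          exact ih _ _ (fun x hx => hmem x (by simp [hx])) hc2
        · have e1 : (checkInner li i (PySem.List.pyRange i (li.length : Int) 1) true s).1
              = false := by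
            rw [row_step li i h0 hn]
            exact inner_bad li i _ true s
              (fun j hj => by rw [PySem.List.mem_pyRange_one] at hj; omega) hrow
          rw [e1]
          exact outer_false li _ _
      · have hrow : rowS li i = [] := by
          unfold rowS
          rw [PySem.List.pyRange_one_eq_nil (by omega)]
          rfl
        rw [hrow, List.nil_append] at hc
        have e1 : checkInner li i (PySem.List.pyRange i (li.length : Int) 1) true s =
            (true, s) := by
          rw [row_step li i h0 hn, PySem.List.pyRange_one_eq_nil (by omega)]
          rfl
        rw [e1]
        dsimp only
        exact ih _ _ (fun x hx => hmem x (by simp [hx])) hc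

theorem check_eq_chain (li : List Int) :
    check li = true ↔
      List.IsChain Ne (0 :: flatS li (PySem.List.pyRange 0 (li.length : Int) 1)) := by
  unfold check
  have hmem : ∀ i ∈ PySem.List.pyRange 0 (li.length : Int) 1,
      0 ≤ i ∧ i < (li.length : Int) := by
    intro i hi
    rw [PySem.List.mem_pyRange_one] at hi
    omega
  by_cases hc : List.IsChain Ne (0 :: flatS li (PySem.List.pyRange 0 (li.length : Int) 1))
  · rw [outer_ok li _ 0 hmem hc]
    simp [hc]
  · rw [outer_bad li _ true 0 hmem hc]
    simp [hc]

-- ===== B-side =====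

theorem bInner_eq (li : List Int) (i : Int) :
    ∀ (js sums : List Int),
      bInner li i js sums = sums ++ js.map (fun j => aGet li i + aGet li j) := by
  intro js
  induction js with
  | nil => intro sums; simp [bInner]
  | cons j js ih =>
    intro sums
    rw [bInner, ih]
    show sums ++ [aGet li i + aGet li j] ++ _ = _
    simp

theorem bOuter_eq (li : List Int) :
    ∀ (is' sums : List Int), bOuter li is' sums = sums ++ flatS li is' := by
  intro is'
  induction is' with
  | nil => intro sums; simp [bOuter, flatS]
  | cons i is' ih =>
    intro sums
    rw [bOuter, bInner_eq, ih]
    show sums ++ rowS li i ++ flatS li is' = sums ++ flatS li (i :: is')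
    simp [flatS]

theorem bScan_iff (sums : List Int) :
    ∀ (ks : List Int), bScan sums ks = true ↔
      ∀ k ∈ ks, PySem.List.pyGetD sums k 0 ≠ PySem.List.pyGetD sums (k + 1) 0 := by
  intro ks
  induction ks with
  | nil => simp [bScan]
  | cons k ks ih =>
    unfold bScan
    by_cases h : PySem.List.pyGetD sums k 0 = PySem.List.pyGetD sums (k + 1) 0
    · simp [h]
    · rw [if_neg h, ih]
      simp [h]

theorem scan_range_iff_chain (sums : List Int) :
    (∀ k ∈ PySem.List.pyRange 0 ((sums.length : Int) - 1) 1,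
        PySem.List.pyGetD sums k 0 ≠ PySem.List.pyGetD sums (k + 1) 0) ↔
      List.IsChain Ne sums := by
  rw [List.isChain_iff_getElem]
  constructor
  · intro h i hi
    have hk := h (i : Int) (by rw [PySem.List.mem_pyRange_one]; omega)
    have e : ((i : Int) + 1) = ((i + 1 : Nat) : Int) := by push_cast; ring
    rw [e, PySem.List.pyGetD_natCast, PySem.List.pyGetD_natCast,
      List.getD_eq_getElem sums 0 (by omega), List.getD_eq_getElem sums 0 hi] at hk
    exact hk
  · intro h k hk
    rw [PySem.List.mem_pyRange_one] at hk
    have e1 : k = ((k.toNat : Nat) : Int) := by omega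
    have e2 : k + 1 = ((k.toNat + 1 : Nat) : Int) := by omega
    rw [e1, show ((k.toNat : Nat) : Int) + 1 = ((k.toNat + 1 : Nat) : Int) from by omega,
      PySem.List.pyGetD_natCast, PySem.List.pyGetD_natCast,
      List.getD_eq_getElem sums 0 (by omega), List.getD_eq_getElem sums 0 (by omega)]
    exact h k.toNat (by omega)

theorem check_alt_eq_chain (li : List Int) :
    check_alt li = true ↔
      List.IsChain Ne (flatS li (PySem.List.pyRange 0 (li.length : Int) 1)) := by
  unfold check_alt
  rw [bOuter_eq, List.nil_append, bScan_iff, scan_range_iff_chain]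

-- the chain over rows a..n-2 decomposed into local conditions
theorem rows_iff (li : List Int) :
    ∀ (m : Nat) (a s : Int), ((li.length : Int) - 1 - a).toNat = m →
      (List.IsChain Ne (s :: flatS li (PySem.List.pyRange a ((li.length : Int) - 1) 1)) ↔
        ((a ≤ (li.length : Int) - 2 → s ≠ aGet li a + aGet li (a + 1)) ∧
         (∀ j, a + 1 ≤ j → j ≤ (li.length : Int) - 2 → aGet li j ≠ aGet li (j + 1)) ∧
         (∀ i, a + 1 ≤ i → i ≤ (li.length : Int) - 2 →
            aGet li (i - 1) + aGet li ((li.length : Int) - 1) ≠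
              aGet li i + aGet li (i + 1)))) := by
  intro m
  induction m with
  | zero =>
    intro a s ha
    rw [PySem.List.pyRange_one_eq_nil (by omega)]
    simp only [flatS, List.flatMap_nil, List.isChain_singleton, true_iff]
    refine ⟨fun h => absurd h (by omega), fun j h1 h2 => absurd h2 (by omega),
      fun i h1 h2 => absurd h2 (by omega)⟩
  | succ k ih =>
    intro a s ha
    have han : a ≤ (li.length : Int) - 2 := by omega
    rw [PySem.List.pyRange_one_cons (by omega)]
    have hflat : flatS li (a :: PySem.List.pyRange (a + 1) ((li.length : Int) - 1) 1) =
        rowS li a ++ flatS li (PySem.List.pyRange (a + 1) ((li.length : Int) - 1) 1) := by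
      simp [flatS]
    rw [hflat, chain_cons_append]
    have hlast : (s :: rowS li a).getLast (by simp) =
        aGet li a + aGet li ((li.length : Int) - 1) := by
      rw [List.getLast_cons (rowS_ne_nil li a (by omega)),
        rowS_getLast li a (by omega)]
    rw [hlast, ih (a + 1) _ (by omega)]
    have hrowchain : List.IsChain Ne (s :: rowS li a) ↔
        (s ≠ aGet li a + aGet li (a + 1) ∧
         ∀ j, a + 1 ≤ j → j ≤ (li.length : Int) - 2 → aGet li j ≠ aGet li (j + 1)) := by
      rw [List.isChain_cons, rowS_head li a (by omega)]
      unfold rowS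
      rw [List.isChain_map, chain_range]
      constructor
      · rintro ⟨hh, hr⟩
        exact ⟨hh _ rfl, fun j hj1 hj2 he => hr j hj1 (by omega) (by rw [he])⟩
      · rintro ⟨hh, hr⟩
        exact ⟨fun y hy => Option.some.inj hy ▸ hh,
          fun j hj1 hj2 he => hr j hj1 (by omega) (add_left_cancel he)⟩
    rw [hrowchain]
    constructor
    · rintro ⟨⟨hhead, hadj⟩, hb1, hb2, hb3⟩
      refine ⟨fun _ => hhead, hadj, fun i hi1 hi2 => ?_⟩
      rcases eq_or_lt_of_le hi1 with h | h
      · rw [← h]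
        simpa using hb1 (by omega)
      · exact hb3 i (by omega) hi2
    · rintro ⟨h1, h2, h3⟩
      refine ⟨⟨h1 han, fun j hj1 hj2 => h2 j hj1 hj2⟩, fun hle => ?_,
        fun j hj1 hj2 => h2 j (by omega) hj2, fun i hi1 hi2 => h3 i (by omega) hi2⟩
      have := h3 (a + 1) (by omega) (by omega)
      simpa using this

theorem drop_last_row (li : List Int) :
    flatS li (PySem.List.pyRange 0 (li.length : Int) 1) =
      flatS li (PySem.List.pyRange 0 ((li.length : Int) - 1) 1) := by
  by_cases h : (1:Int) ≤ (li.length : Int)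
  · have e : PySem.List.pyRange 0 (li.length : Int) 1 =
        PySem.List.pyRange 0 ((li.length : Int) - 1) 1 ++ [(li.length : Int) - 1] := by
      have := PySem.List.pyRange_one_succ_right (a := 0) (b := (li.length : Int) - 1) (by omega)
      rwa [sub_add_cancel] at this
    have hrow : rowS li ((li.length : Int) - 1) = [] := by
      unfold rowS
      rw [sub_add_cancel, PySem.List.pyRange_one_eq_nil (by omega)]
      rfl
    rw [e]
    simp [flatS, hrow]
  · rw [PySem.List.pyRange_one_eq_nil (by omega),
      PySem.List.pyRange_one_eq_nil (by omega)]

-- local characterisations of the two ports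

def C2 (li : List Int) : Prop :=
  ∀ j, 1 ≤ j → j ≤ (li.length : Int) - 2 → aGet li j ≠ aGet li (j + 1)
def C3 (li : List Int) : Prop :=
  ∀ i, 1 ≤ i → i ≤ (li.length : Int) - 2 →
    aGet li (i - 1) + aGet li ((li.length : Int) - 1) ≠ aGet li i + aGet li (i + 1)

theorem check_local (li : List Int) :
    check li = true ↔
      ((2 ≤ (li.length : Int) → (0:Int) ≠ aGet li 0 + aGet li 1) ∧ C2 li ∧ C3 li) := by
  rw [check_eq_chain, drop_last_row,
    rows_iff li (((li.length : Int) - 1 - 0).toNat) 0 0 rfl]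
  constructor
  · rintro ⟨h1, h2, h3⟩
    exact ⟨fun h => by simpa using h1 (by omega),
      fun j hj1 hj2 => h2 j (by omega) hj2, fun i hi1 hi2 => h3 i (by omega) hi2⟩
  · rintro ⟨h1, h2, h3⟩
    exact ⟨fun h => by simpa using h1 (by omega),
      fun j hj1 hj2 => h2 j (by omega) hj2, fun i hi1 hi2 => h3 i (by omega) hi2⟩

theorem flatS_head (li : List Int) (h : 2 ≤ (li.length : Int)) :
    (flatS li (PySem.List.pyRange 0 ((li.length : Int) - 1) 1)).head? =
      some (aGet li 0 + aGet li 1) := by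
  rw [PySem.List.pyRange_one_cons (by omega)]
  have hflat : flatS li (0 :: PySem.List.pyRange (0 + 1) ((li.length : Int) - 1) 1) =
      rowS li 0 ++ flatS li (PySem.List.pyRange (0 + 1) ((li.length : Int) - 1) 1) := by
    simp [flatS]
  rw [hflat, List.head?_append, rowS_head li 0 (by omega)]
  simp

theorem check_alt_local (li : List Int) :
    check_alt li = true ↔ (C2 li ∧ C3 li) := by
  rw [check_alt_eq_chain, drop_last_row]
  by_cases h : 2 ≤ (li.length : Int)
  · have hiff : List.IsChain Ne
        (flatS li (PySem.List.pyRange 0 ((li.length : Int) - 1) 1)) ↔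
        List.IsChain Ne ((aGet li 0 + aGet li 1 + 1) ::
          flatS li (PySem.List.pyRange 0 ((li.length : Int) - 1) 1)) := by
      rw [List.isChain_cons]
      constructor
      · intro hc
        refine ⟨fun y hy => ?_, hc⟩
        rw [flatS_head li h] at hy
        have : aGet li 0 + aGet li 1 = y := by simpa using hy
        omega
      · exact fun hc => hc.2
    rw [hiff, rows_iff li (((li.length : Int) - 1 - 0).toNat) 0 _ rfl]
    constructor
    · rintro ⟨-, h2, h3⟩
      exact ⟨fun j hj1 hj2 => h2 j (by omega) hj2, fun i hi1 hi2 => h3 i (by omega) hi2⟩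
    · rintro ⟨h2, h3⟩
      exact ⟨fun _ => by simp only [zero_add]; omega,
        fun j hj1 hj2 => h2 j (by omega) hj2, fun i hi1 hi2 => h3 i (by omega) hi2⟩
  · have hnil : flatS li (PySem.List.pyRange 0 ((li.length : Int) - 1) 1) = [] := by
      rw [PySem.List.pyRange_one_eq_nil (by omega)]
      rfl
    rw [hnil]
    simp only [List.IsChain.nil, true_iff]
    exact ⟨fun j hj1 hj2 => absurd hj2 (by omega), fun i hi1 hi2 => absurd hi2 (by omega)⟩

theorem D_local (li : List Int) :
    D_check li ↔
      (2 ≤ (li.length : Int) ∧ aGet li 0 + aGet li 1 = 0 ∧ C2 li ∧ C3 li) := by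
  unfold D_check C2 C3
  constructor
  · rintro ⟨h1, h2, h3⟩
    refine ⟨h1, h2, fun j hj1 hj2 => ?_, fun i hi1 hi2 => ?_⟩
    · have := (h3 (j - 1) (by rw [PySem.List.mem_pyRange_one]; omega)).1
      have e1 : j - 1 + 1 = j := by omega
      have e2 : j - 1 + 2 = j + 1 := by omega
      rwa [e1, e2] at this
    · have := (h3 (i - 1) (by rw [PySem.List.mem_pyRange_one]; omega)).2
      have e1 : i - 1 + 1 = i := by omega
      have e2 : i - 1 + 2 = i + 1 := by omega
      rwa [e1, e2] at this
  · rintro ⟨h1, h2, h3, h4⟩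
    refine ⟨h1, h2, fun i hi => ?_⟩
    rw [PySem.List.mem_pyRange_one] at hi
    constructor
    · have := h3 (i + 1) (by omega) (by omega)
      have e0 : i + 1 + 1 = i + 2 := by omega
      rwa [e0] at this
    · have := h4 (i + 1) (by omega) (by omega)
      have e1 : i + 1 - 1 = i := by omega
      have e2 : i + 1 + 1 = i + 2 := by omega
      rwa [e1, e2] at this

-- ===== VERDICT (by name: the statements are the Claim_ definitions above) =====
theorem check_spec : Claim_unchanged_check := by
  intro li _ hD
  rw [Bool.eq_iff_iff, check_local, check_alt_local]
  constructor
  · rintro ⟨-, hc⟩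
    exact hc
  · intro hc
    refine ⟨fun hn h0 => ?_, hc⟩
    exact hD ((D_local li).2 ⟨hn, h0.symm, hc.1, hc.2⟩)

theorem check_changed : Claim_changed_check := by unfold Claim_changed_check; decide

theorem check_tight : Claim_exact_check := by
  intro li _ hD
  obtain ⟨hn, h0, hc2, hc3⟩ := (D_local li).1 hD
  have hB : check_alt li = true := (check_alt_local li).2 ⟨hc2, hc3⟩
  have hA : check li = false := by
    cases hAc : check li with
    | false => rfl
    | true =>
      obtain ⟨h1, -⟩ := (check_local li).1 hAc
      exact absurd h0.symm (h1 hn)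
  rw [hA, hB]
  exact Bool.false_ne_true
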